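-- pv_equiv track=rewrite | github.com/Amin-Mohamed1/ConnectFourGame | Application/Services/HeuristicCriterias/CouldConnectFourInOneMove.py | __connected_threes_vertical
-- ===== SOURCE A (Python) =====
-- def __connected_threes_vertical(board: list[list[str]], piece: str) -> int:
--     score: int = 0
--     for col in range(len(board[0])):
--         piece_count: int = 0
--         for row in range(len(board)):
--             if board[row][col] == piece:
--                 piece_count += 1
--                 if piece_count >= 3:
--                     if row + 1 < len(board) and board[row + 1][col] == '':
--                         score += 1
--                     if row - 3 >= 0 and board[row - 3][col] == '':
--                         score += 1
--             else:
--                 piece_count = 0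
--     return score
-- ===== SOURCE B (Python) =====
-- def __connected_threes_vertical(board: list[list[str]], piece: str) -> int:
--     n = len(board)
--     target = (piece, piece, piece)
--     score = 0
--     for col in range(len(board[0])):
--         column = tuple(row[col] for row in board)
--         for r in range(2, n):
--             if column[r - 2:r + 1] == target:
--                 if r + 1 < n and column[r + 1] == '':
--                     score += 1
--                 if r >= 3 and column[r - 3] == '':
--                     score += 1
--     return score
-- ===== Notes on version B (the rewrite author's own statement) =====
-- stated objective: alternative
-- what changed: Replaces A's stateful running piece_count (incremented/reset per cell, with repeated open-end tests while the counter stays >= 3) by a stateless scan: each column is extracted once and every three-cell window column[r-2:r+1] is compared to (piece, piece, piece), adding the two boundary-emptiness checks only at matching windows.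
import Mathlib
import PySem

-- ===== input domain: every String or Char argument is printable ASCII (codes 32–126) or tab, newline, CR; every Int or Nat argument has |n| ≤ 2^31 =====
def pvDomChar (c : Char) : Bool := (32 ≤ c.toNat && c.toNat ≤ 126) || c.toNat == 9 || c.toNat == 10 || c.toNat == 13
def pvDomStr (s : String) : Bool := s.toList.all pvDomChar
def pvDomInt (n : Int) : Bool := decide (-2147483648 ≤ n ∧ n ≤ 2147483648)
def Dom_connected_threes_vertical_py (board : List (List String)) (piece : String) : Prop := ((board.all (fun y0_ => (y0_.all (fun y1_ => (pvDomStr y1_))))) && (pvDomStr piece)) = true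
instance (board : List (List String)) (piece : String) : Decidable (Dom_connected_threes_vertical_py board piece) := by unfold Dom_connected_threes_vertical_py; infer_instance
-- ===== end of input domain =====

-- B replaces A's per-cell running streak counter by stateless three-cell window tests on each
-- extracted column (objective: alternative decomposition, same asymptotic cost).

-- ===== PORT A =====
-- literal transliteration of A: outer loop over columns, inner loop over rows carrying
-- (score, piece_count); board accesses via pyGetD (always in range under Pre_).
def connected_threes_vertical_py (board : List (List String)) (piece : String) : Int :=
  ((PySem.List.pyRange 0 ((PySem.List.pyGetD board 0 []).length : Int) 1).foldl (fun score col =>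
    ((PySem.List.pyRange 0 ((board.length : Int)) 1).foldl (fun (st : Int × Int) row =>
      if PySem.List.pyGetD (PySem.List.pyGetD board row []) col "" = piece then
        let pc := st.2 + 1
        if 3 ≤ pc then
          let s1 := if row + 1 < ((board.length : Int)) ∧ PySem.List.pyGetD (PySem.List.pyGetD board (row + 1) []) col "" = "" then st.1 + 1 else st.1
          let s2 := if 0 ≤ row - 3 ∧ PySem.List.pyGetD (PySem.List.pyGetD board (row - 3) []) col "" = "" then s1 + 1 else s1
          (s2, pc)
        else (st.1, pc)
      else (st.1, 0)) (score, 0)).1) 0)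

-- ===== PORT B =====
-- literal transliteration of B (Source B): per column, extract the column list, then compare the
-- three-cell slice column[r-2:r+1] with (piece, piece, piece) for each r in range(2, n).
def connected_threes_vertical_py_alt (board : List (List String)) (piece : String) : Int :=
  ((PySem.List.pyRange 0 ((PySem.List.pyGetD board 0 []).length : Int) 1).foldl (fun score col =>
    let column := board.map (fun row => PySem.List.pyGetD row col "")
    (PySem.List.pyRange 2 ((board.length : Int)) 1).foldl (fun score r =>
      if PySem.List.slice column (some (r - 2)) (some (r + 1)) = [piece, piece, piece] then
        let s1 := if r + 1 < ((board.length : Int)) ∧ PySem.List.pyGetD column (r + 1) "" = "" then score + 1 else score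
        if 3 ≤ r ∧ PySem.List.pyGetD column (r - 3) "" = "" then s1 + 1 else s1
      else score) score) 0)

-- ===== PRECONDITION & SPEC =====
-- Pre_ excludes exactly the inputs where the Python A raises IndexError: the empty board
-- (len(board[0])) and ragged boards with some row shorter than row 0.
def Pre_connected_threes_vertical_py (board : List (List String)) (piece : String) : Prop :=
  board ≠ [] ∧ ∀ row ∈ board, (board.headD []).length ≤ row.length
instance (board : List (List String)) (piece : String) : Decidable (Pre_connected_threes_vertical_py board piece) := by unfold Pre_connected_threes_vertical_py; infer_instance
def pvWitness_connected_threes_vertical_py : List (List String) × String :=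
  ([[""], ["x"], ["x"], ["x"]], "x")
def Spec_connected_threes_vertical_py (board : List (List String)) (piece : String) (out : Int) : Prop := out = connected_threes_vertical_py_alt board piece
instance (board : List (List String)) (piece : String) (out : Int) : Decidable (Spec_connected_threes_vertical_py board piece out) := by unfold Spec_connected_threes_vertical_py; infer_instance

-- ===== CLAIM (what is proved, stated in full; the proofs are below) =====
def Claim_equal_connected_threes_vertical_py : Prop := ∀ (board : List (List String)) (piece : String), Dom_connected_threes_vertical_py board piece → Pre_connected_threes_vertical_py board piece → Spec_connected_threes_vertical_py board piece (connected_threes_vertical_py board piece)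

-- ===== LEMMAS AND PROOFS =====

-- A's running streak counter, as a function of the number k of processed rows of a column c
def pvTcnt (piece : String) (c : List String) : Nat → Nat
  | 0 => 0
  | k+1 => if c.getD k "" = piece then pvTcnt piece c k + 1 else 0

-- B's per-row contribution on a column c
def pvGw (piece : String) (c : List String) (r : Int) : Int :=
  if PySem.List.slice c (some (r - 2)) (some (r + 1)) = [piece, piece, piece] then
    (if r + 1 < (c.length : Int) ∧ PySem.List.pyGetD c (r + 1) "" = "" then 1 else 0)
    + (if 3 ≤ r ∧ PySem.List.pyGetD c (r - 3) "" = "" then 1 else 0)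
  else 0

-- A's inner-loop body, rewritten over the column c (proved equal to the port's body below)
def pvStepA (piece : String) (c : List String) (st : Int × Int) (row : Int) : Int × Int :=
  if PySem.List.pyGetD c row "" = piece then
    let pc := st.2 + 1
    if 3 ≤ pc then
      let s1 := if row + 1 < ((c.length : Int)) ∧ PySem.List.pyGetD c (row + 1) "" = "" then st.1 + 1 else st.1
      let s2 := if 0 ≤ row - 3 ∧ PySem.List.pyGetD c (row - 3) "" = "" then s1 + 1 else s1
      (s2, pc)
    else (st.1, pc)
  else (st.1, 0)

theorem pvTcnt_le (piece : String) (c : List String) (k : Nat) : pvTcnt piece c k ≤ k := by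
  induction k with
  | zero => simp [pvTcnt]
  | succ k ih => simp only [pvTcnt]; split <;> omega

theorem pvTcnt_ge_two (piece : String) (c : List String) (k : Nat) :
    2 ≤ pvTcnt piece c k ↔ 2 ≤ k ∧ c.getD (k - 1) "" = piece ∧ c.getD (k - 2) "" = piece := by
  match k with
  | 0 => simp [pvTcnt]
  | 1 => have := pvTcnt_le piece c 1; omega
  | (k+2) =>
    have e1 : (k + 2) - 1 = k + 1 := rfl
    have e2 : (k + 2) - 2 = k := rfl
    rw [e1, e2]
    show 2 ≤ (if c.getD (k+1) "" = piece then pvTcnt piece c (k+1) + 1 else 0) ↔ _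
    by_cases h1 : c.getD (k+1) "" = piece
    · rw [if_pos h1]
      show 2 ≤ (if c.getD k "" = piece then pvTcnt piece c k + 1 else 0) + 1 ↔ _
      by_cases h0 : c.getD k "" = piece
      · rw [if_pos h0]
        constructor
        · intro _; exact ⟨by omega, h1, h0⟩
        · intro _; omega
      · rw [if_neg h0]
        constructor
        · intro h; omega
        · rintro ⟨_, _, h⟩; exact absurd h h0
    · rw [if_neg h1]
      constructor
      · intro h; omega
      · rintro ⟨_, h, _⟩; exact absurd h h1

theorem pvWindow_iff (piece : String) (c : List String) (k : Nat) (hk : k < c.length) :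
    PySem.List.slice c (some ((k : Int) - 2)) (some ((k : Int) + 1)) = [piece, piece, piece]
    ↔ 2 ≤ k ∧ c.getD (k - 2) "" = piece ∧ c.getD (k - 1) "" = piece ∧ c.getD k "" = piece := by
  by_cases h2 : 2 ≤ k
  · have e1 : ((k : Int) - 2) = ((k - 2 : Nat) : Int) := by omega
    have e2 : ((k : Int) + 1) = ((k - 2 : Nat) : Int) + ((3 : Nat) : Int) := by omega
    rw [e1, e2, PySem.List.slice_natCast_add]
    have hk2 : k - 2 < c.length := by omega
    have hk1 : k - 2 + 1 < c.length := by omega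
    have hk0 : k - 2 + 1 + 1 < c.length := by omega
    rw [List.drop_eq_getElem_cons hk2, List.drop_eq_getElem_cons hk1,
        List.drop_eq_getElem_cons hk0]
    rw [List.getD_eq_getElem c "" hk2, List.getD_eq_getElem c "" (show k - 1 < c.length by omega),
        List.getD_eq_getElem c "" hk]
    have i1 : k - 2 + 1 = k - 1 := by omega
    simp only [List.take_succ_cons, List.take_zero, List.cons.injEq, and_true, i1]
    simp only [h2, true_and]
    constructor
    · rintro ⟨a, b, d⟩
      refine ⟨a, b, ?_⟩
      rw [getElem_congr_idx (show k - 1 + 1 = k from by omega)] at d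
      exact d
    · rintro ⟨a, b, d⟩
      refine ⟨a, b, ?_⟩
      rw [getElem_congr_idx (show k - 1 + 1 = k from by omega)]
      exact d
  · constructor
    · intro h
      have hl := congrArg List.length h
      rw [PySem.List.length_slice] at hl
      interval_cases k
      · have ha : PySem.List.clampIdx c.length ((0 : Int) - 2) = c.length - 2 := by
          have := PySem.List.clampIdx_neg_natCast c.length 2 (by omega)
          simpa using this
        have hb : PySem.List.clampIdx c.length ((0 : Int) + 1) = min 1 c.length := by
          have := PySem.List.clampIdx_natCast c.length 1
          simpa using this
        exfalso
        simp only [Nat.cast_zero, List.length_cons, List.length_nil] at hl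
        rw [ha, hb] at hl
        omega
      · have ha : PySem.List.clampIdx c.length ((1 : Int) - 2) = c.length - 1 := by
          have := PySem.List.clampIdx_neg_natCast c.length 1 (by omega)
          simpa using this
        have hb : PySem.List.clampIdx c.length ((1 : Int) + 1) = min 2 c.length := by
          have := PySem.List.clampIdx_natCast c.length 2
          simpa using this
        exfalso
        simp only [Nat.cast_one, List.length_cons, List.length_nil] at hl
        rw [ha, hb] at hl
        omega
    · intro h; omega

-- pvGw vanishes at rows 0 and 1 (the slice is too short to equal a 3-list)
theorem pvGw_zero (piece : String) (c : List String) : pvGw piece c 0 = 0 := by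
  unfold pvGw
  rw [if_neg]
  intro h
  have hl := congrArg List.length h
  rw [PySem.List.length_slice] at hl
  have ha : PySem.List.clampIdx c.length ((0 : Int) - 2) = c.length - 2 := by
    have := PySem.List.clampIdx_neg_natCast c.length 2 (by omega)
    simpa using this
  have hb : PySem.List.clampIdx c.length ((0 : Int) + 1) = min 1 c.length := by
    have := PySem.List.clampIdx_natCast c.length 1
    simpa using this
  simp only [List.length_cons, List.length_nil] at hl
  rw [ha, hb] at hl
  omega

theorem pvGw_one (piece : String) (c : List String) : pvGw piece c 1 = 0 := by
  unfold pvGw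
  rw [if_neg]
  intro h
  have hl := congrArg List.length h
  rw [PySem.List.length_slice] at hl
  have ha : PySem.List.clampIdx c.length ((1 : Int) - 2) = c.length - 1 := by
    have := PySem.List.clampIdx_neg_natCast c.length 1 (by omega)
    simpa using this
  have hb : PySem.List.clampIdx c.length ((1 : Int) + 1) = min 2 c.length := by
    have := PySem.List.clampIdx_natCast c.length 2
    simpa using this
  simp only [List.length_cons, List.length_nil] at hl
  rw [ha, hb] at hl
  omega

-- KEY step lemma: one step of A's counter loop adds exactly B's window contribution
theorem pvStepA_eq (piece : String) (c : List String) (k : Nat) (hk : k < c.length) (s : Int) :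
    pvStepA piece c (s, (pvTcnt piece c k : Int)) (k : Int)
      = (s + pvGw piece c (k : Int), (pvTcnt piece c (k + 1) : Int)) := by
  unfold pvStepA pvGw
  rw [PySem.List.pyGetD_natCast]
  by_cases hc : c.getD k "" = piece
  · have ht1 : pvTcnt piece c (k + 1) = pvTcnt piece c k + 1 := by
      show (if c.getD k "" = piece then pvTcnt piece c k + 1 else 0) = pvTcnt piece c k + 1
      rw [if_pos hc]
    by_cases h2 : 2 ≤ pvTcnt piece c k
    · have hw : PySem.List.slice c (some ((k : Int) - 2)) (some ((k : Int) + 1)) = [piece, piece, piece] := by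
        rw [pvWindow_iff piece c k hk]
        have := (pvTcnt_ge_two piece c k).mp h2
        exact ⟨this.1, this.2.2, this.2.1, hc⟩
      rw [if_pos hc, if_pos hw]
      simp only [ht1]
      rw [if_pos (by push_cast; omega : (3 : Int) ≤ (pvTcnt piece c k : Int) + 1)]
      have hiff : (0 ≤ (k : Int) - 3 ∧ PySem.List.pyGetD c ((k : Int) - 3) "" = "")
          ↔ (3 ≤ (k : Int) ∧ PySem.List.pyGetD c ((k : Int) - 3) "" = "") := by
        constructor <;> (rintro ⟨h, hx⟩; exact ⟨by omega, hx⟩)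
      rw [if_congr hiff rfl rfl]
      push_cast
      split_ifs <;> simp <;> ring
    · have hw : ¬ PySem.List.slice c (some ((k : Int) - 2)) (some ((k : Int) + 1)) = [piece, piece, piece] := by
        rw [pvWindow_iff piece c k hk]
        intro h
        exact h2 ((pvTcnt_ge_two piece c k).mpr ⟨h.1, h.2.2.1, h.2.1⟩)
      rw [if_pos hc, if_neg hw]
      simp only [ht1]
      rw [if_neg (by push_cast; omega : ¬ (3 : Int) ≤ (pvTcnt piece c k : Int) + 1)]
      simp
  · have ht0 : pvTcnt piece c (k + 1) = 0 := by
      show (if c.getD k "" = piece then pvTcnt piece c k + 1 else 0) = 0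
      rw [if_neg hc]
    have hw : ¬ PySem.List.slice c (some ((k : Int) - 2)) (some ((k : Int) + 1)) = [piece, piece, piece] := by
      rw [pvWindow_iff piece c k hk]
      intro h; exact hc h.2.2.2
    rw [if_neg hc, if_neg hw]
    simp [ht0]

-- folding A's counter loop from row k onward sums B's window contributions
theorem pvMainA (piece : String) (c : List String) :
    ∀ (m k : Nat), k + m = c.length → ∀ s : Int,
    ((PySem.List.pyRange (k : Int) ((c.length : Int)) 1).foldl (pvStepA piece c)
        (s, (pvTcnt piece c k : Int))).1
      = s + ((PySem.List.pyRange (k : Int) ((c.length : Int)) 1).map (pvGw piece c)).sum := by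
  intro m
  induction m with
  | zero =>
    intro k hk s
    rw [PySem.List.pyRange_one_eq_nil (by omega)]
    simp
  | succ m ih =>
    intro k hk s
    rw [PySem.List.pyRange_one_cons (by exact_mod_cast (by omega : (k : Int) < (c.length : Int)))]
    simp only [List.foldl_cons, List.map_cons, List.sum_cons]
    rw [pvStepA_eq piece c k (by omega) s]
    have e : ((k : Int) + 1) = ((k + 1 : Nat) : Int) := by push_cast; ring
    rw [e, ih (k + 1) (by omega) (s + pvGw piece c (k : Int))]
    ring

-- the inner loops agree on any column c
theorem pvInnerC (piece : String) (c : List String) (s : Int) :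
    ((PySem.List.pyRange 0 ((c.length : Int)) 1).foldl (pvStepA piece c) (s, 0)).1
      = (PySem.List.pyRange 2 ((c.length : Int)) 1).foldl (fun score r =>
          if PySem.List.slice c (some (r - 2)) (some (r + 1)) = [piece, piece, piece] then
            let s1 := if r + 1 < ((c.length : Int)) ∧ PySem.List.pyGetD c (r + 1) "" = "" then score + 1 else score
            if 3 ≤ r ∧ PySem.List.pyGetD c (r - 3) "" = "" then s1 + 1 else s1
          else score) s := by
  have hB : (PySem.List.pyRange 2 ((c.length : Int)) 1).foldl (fun score r =>
          if PySem.List.slice c (some (r - 2)) (some (r + 1)) = [piece, piece, piece] then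
            let s1 := if r + 1 < ((c.length : Int)) ∧ PySem.List.pyGetD c (r + 1) "" = "" then score + 1 else score
            if 3 ≤ r ∧ PySem.List.pyGetD c (r - 3) "" = "" then s1 + 1 else s1
          else score) s
      = (PySem.List.pyRange 2 ((c.length : Int)) 1).foldl (fun score r => score + pvGw piece c r) s := by
    apply PySem.List.foldl_congr_mem
    intro acc r _
    unfold pvGw
    split_ifs <;> simp <;> ring
  rw [hB, PySem.List.foldl_add]
  have hm := pvMainA piece c c.length 0 (by omega) s
  have e : ((pvTcnt piece c 0 : Nat) : Int) = 0 := by norm_num [pvTcnt]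
  simp only [Nat.cast_zero, e] at hm
  rw [hm]
  congr 1
  by_cases h2 : 2 ≤ c.length
  · rw [PySem.List.pyRange_one_cons (by exact_mod_cast (by omega : (0:Int) < (c.length : Int)))]
    rw [PySem.List.pyRange_one_cons (by exact_mod_cast (by omega : (0:Int) + 1 < (c.length : Int)))]
    simp only [List.map_cons, List.sum_cons]
    norm_num [pvGw_zero, pvGw_one]
  · have hc : c.length = 0 ∨ c.length = 1 := by omega
    rcases hc with h | h <;> simp only [h, Nat.cast_zero, Nat.cast_one]
    · rw [PySem.List.pyRange_one_eq_nil (by norm_num : (0:Int) ≤ 0),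
         PySem.List.pyRange_one_eq_nil (by norm_num : (0:Int) ≤ 2)]
    · rw [PySem.List.pyRange_one_eq_nil (by norm_num : (1:Int) ≤ 2)]
      rw [PySem.List.pyRange_one_cons (by norm_num : (0:Int) < 1),
          PySem.List.pyRange_one_eq_nil (by norm_num : (1:Int) ≤ 0 + 1)]
      simp [pvGw_zero]

-- A's inner body equals pvStepA on the extracted column (unconditionally, via pyGetD_map)
theorem pvBodyA_eq (board : List (List String)) (piece : String) (col : Int)
    (st : Int × Int) (row : Int) :
    (if PySem.List.pyGetD (PySem.List.pyGetD board row []) col "" = piece then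
        let pc := st.2 + 1
        if 3 ≤ pc then
          let s1 := if row + 1 < ((board.length : Int)) ∧ PySem.List.pyGetD (PySem.List.pyGetD board (row + 1) []) col "" = "" then st.1 + 1 else st.1
          let s2 := if 0 ≤ row - 3 ∧ PySem.List.pyGetD (PySem.List.pyGetD board (row - 3) []) col "" = "" then s1 + 1 else s1
          (s2, pc)
        else (st.1, pc)
      else (st.1, 0))
      = pvStepA piece (board.map (fun r => PySem.List.pyGetD r col "")) st row := by
  have hf : ∀ i : Int, PySem.List.pyGetD (board.map (fun r => PySem.List.pyGetD r col "")) i ""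
      = PySem.List.pyGetD (PySem.List.pyGetD board i []) col "" := by
    intro i
    have h0 : PySem.List.pyGetD ([] : List String) col "" = "" := by
      simp [PySem.List.pyGetD, PySem.List.pyGet?, PySem.List.pyIdx?]
    have := PySem.List.pyGetD_map (fun r => PySem.List.pyGetD r col "") board i []
    rw [h0] at this
    exact this
  unfold pvStepA
  rw [hf row, hf (row + 1), hf (row - 3), List.length_map]

-- ===== VERDICT (by name: the statement is the Claim_ definition above) =====
theorem connected_threes_vertical_py_spec : Claim_equal_connected_threes_vertical_py := by
  intro board piece _ _
  unfold Spec_connected_threes_vertical_py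
  unfold connected_threes_vertical_py connected_threes_vertical_py_alt
  apply PySem.List.foldl_congr_mem
  intro acc col _
  have h1 : ((PySem.List.pyRange 0 ((board.length : Int)) 1).foldl (fun (st : Int × Int) row =>
      if PySem.List.pyGetD (PySem.List.pyGetD board row []) col "" = piece then
        let pc := st.2 + 1
        if 3 ≤ pc then
          let s1 := if row + 1 < ((board.length : Int)) ∧ PySem.List.pyGetD (PySem.List.pyGetD board (row + 1) []) col "" = "" then st.1 + 1 else st.1
          let s2 := if 0 ≤ row - 3 ∧ PySem.List.pyGetD (PySem.List.pyGetD board (row - 3) []) col "" = "" then s1 + 1 else s1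
          (s2, pc)
        else (st.1, pc)
      else (st.1, 0)) (acc, 0)).1
      = ((PySem.List.pyRange 0 ((board.length : Int)) 1).foldl
          (pvStepA piece (board.map (fun r => PySem.List.pyGetD r col ""))) (acc, 0)).1 := by
    congr 1
    apply PySem.List.foldl_congr_mem
    intro st row _
    exact pvBodyA_eq board piece col st row
  have hlen : (board.map (fun r => PySem.List.pyGetD r col "")).length = board.length := by
    simp
  have h2 := pvInnerC piece (board.map (fun r => PySem.List.pyGetD r col "")) acc
  simp only [hlen] at h2
  exact h1.trans h2
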